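-- pv_equiv track=rewrite | github.com/sugipamo/oopstracker | src/oopstracker/unified_detector.py | _extract_candidate_groups
-- ===== SOURCE A (Python) =====
-- from typing import List, Dict, Any, Optional
--
-- def _extract_candidate_groups(prepared_records: List[Dict[str, Any]]) -> Dict[str, List[Dict[str, Any]]]:
--     """Layer 2: Group records by features to reduce comparison space."""
--     groups = {}
--
--     for prepared_record in prepared_records:
--         feature_key = prepared_record['feature_key']
--
--         if feature_key not in groups:
--             groups[feature_key] = []
--         groups[feature_key].append(prepared_record)
--
--     # Filter out single-item groups (no duplicates possible)
--     return {k: v for k, v in groups.items() if len(v) > 1}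
-- ===== SOURCE B (Python) =====
-- def _extract_candidate_groups(prepared_records):
--     """Two passes: count keys first, then collect only records of multi-record keys."""
--     counts = {}
--     for record in prepared_records:
--         k = record['feature_key']
--         counts[k] = counts.get(k, 0) + 1
--     groups = {}
--     for record in prepared_records:
--         k = record['feature_key']
--         if counts[k] > 1:
--             groups.setdefault(k, []).append(record)
--     return groups
-- ===== Notes on version B (the rewrite author's own statement) =====
-- stated objective: alternative
-- what changed: Replaces group-everything-then-filter with a counting pass over the records followed by a second pass that only ever inserts records whose feature_key occurs more than once, so no singleton group is ever built or filtered; Pre_ only excludes records without a 'feature_key' key, where both A and B raise KeyError.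
import Mathlib
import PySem

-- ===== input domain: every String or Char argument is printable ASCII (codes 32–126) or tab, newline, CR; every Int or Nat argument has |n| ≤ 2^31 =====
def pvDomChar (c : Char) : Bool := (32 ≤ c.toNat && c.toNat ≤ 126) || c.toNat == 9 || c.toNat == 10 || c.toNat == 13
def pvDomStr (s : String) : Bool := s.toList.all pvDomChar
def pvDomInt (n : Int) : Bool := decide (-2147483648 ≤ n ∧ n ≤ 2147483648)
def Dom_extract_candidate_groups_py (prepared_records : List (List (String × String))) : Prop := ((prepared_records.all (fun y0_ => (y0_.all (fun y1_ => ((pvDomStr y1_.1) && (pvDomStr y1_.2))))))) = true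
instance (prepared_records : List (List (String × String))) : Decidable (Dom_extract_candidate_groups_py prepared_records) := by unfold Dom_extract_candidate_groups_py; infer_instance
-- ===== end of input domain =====

-- B replaces group-all-then-filter with a counting pass plus a second pass that only collects records of multi-occurrence keys (alternative decomposition, same cost).

-- ===== PORT A =====
-- record['feature_key']: first-match lookup in the record; Pre_ guarantees the key is present (Python raises KeyError otherwise, so the default "" is never used inside Pre_)
def pvKeyOf (r : List (String × String)) : String :=
  ((PySem.Dict.mk r).get? "feature_key").getD ""

def extract_candidate_groups_py (prepared_records : List (List (String × String))) : List (String × List (List (String × String))) :=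
  let groups : PySem.Dict String (List (List (String × String))) :=
    prepared_records.foldl (fun groups r =>
      let feature_key := pvKeyOf r
      let groups := if groups.contains feature_key then groups else groups.insert feature_key []
      groups.modify feature_key [] (fun v => v ++ [r])) PySem.Dict.empty
  (groups.items).filter (fun kv => decide (1 < kv.2.length))

-- ===== PORT B =====
def extract_candidate_groups_py_alt (prepared_records : List (List (String × String))) : List (String × List (List (String × String))) :=
  let counts : PySem.Dict String Int :=
    prepared_records.foldl (fun counts r => counts.modify (pvKeyOf r) 0 (fun c => c + 1)) PySem.Dict.empty
  let groups : PySem.Dict String (List (List (String × String))) :=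
    prepared_records.foldl (fun groups r =>
      let k := pvKeyOf r
      if counts.getD k 0 > 1 then (groups.setdefault k []).modify k [] (fun v => v ++ [r]) else groups) PySem.Dict.empty
  groups.items

-- ===== PRECONDITION & SPEC =====
-- Pre_ excludes exactly the records with no 'feature_key' entry, on which the Python (A and B alike) raises KeyError.
def Pre_extract_candidate_groups_py (prepared_records : List (List (String × String))) : Prop :=
  (prepared_records.all (fun r => r.any (fun p => p.1 == "feature_key"))) = true
instance (prepared_records : List (List (String × String))) : Decidable (Pre_extract_candidate_groups_py prepared_records) := by unfold Pre_extract_candidate_groups_py; infer_instance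
def pvWitness_extract_candidate_groups_py : (List (List (String × String))) :=
  [[("feature_key", "a"), ("x", "1")], [("feature_key", "a"), ("x", "2")], [("feature_key", "b")]]

def Spec_extract_candidate_groups_py (prepared_records : List (List (String × String))) (out : List (String × List (List (String × String)))) : Prop := out = extract_candidate_groups_py_alt prepared_records
instance (prepared_records : List (List (String × String))) (out : List (String × List (List (String × String)))) : Decidable (Spec_extract_candidate_groups_py prepared_records out) := by unfold Spec_extract_candidate_groups_py; infer_instance

-- ===== CLAIM (what is proved, stated in full; the proofs are below) =====
def Claim_equal_extract_candidate_groups_py : Prop := ∀ (prepared_records : List (List (String × String))), Dom_extract_candidate_groups_py prepared_records → Pre_extract_candidate_groups_py prepared_records → Spec_extract_candidate_groups_py prepared_records (extract_candidate_groups_py prepared_records)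

-- ===== LEMMAS AND PROOFS =====

-- the common grouping step both loop bodies reduce to
def pvStepM (g : PySem.Dict String (List (List (String × String)))) (r : List (String × String)) : PySem.Dict String (List (List (String × String))) :=
  g.modify (pvKeyOf r) [] (fun v => v ++ [r])

def pvG (l : List (List (String × String))) : PySem.Dict String (List (List (String × String))) :=
  l.foldl pvStepM PySem.Dict.empty

lemma pv_stepA (g : PySem.Dict String (List (List (String × String)))) (r : List (String × String)) :
    (let feature_key := pvKeyOf r;
     let g' := if g.contains feature_key then g else g.insert feature_key [];
     g'.modify feature_key [] (fun v => v ++ [r])) = pvStepM g r := by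
  cases h : g.contains (pvKeyOf r) with
  | true => simp [h, pvStepM]
  | false =>
    simp only [h, Bool.false_eq_true, if_false, pvStepM, PySem.Dict.modify,
      PySem.Dict.getD_insert_self, PySem.Dict.insert_insert_self,
      PySem.Dict.getD_of_not_contains _ _ h]

lemma pv_stepB (g : PySem.Dict String (List (List (String × String)))) (r : List (String × String)) :
    (g.setdefault (pvKeyOf r) []).modify (pvKeyOf r) [] (fun v => v ++ [r]) = pvStepM g r := by
  cases h : g.contains (pvKeyOf r) with
  | true => simp [PySem.Dict.setdefault_of_contains _ _ h, pvStepM]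
  | false =>
    rw [PySem.Dict.setdefault_of_not_contains _ _ h]
    simp only [pvStepM, PySem.Dict.modify, PySem.Dict.getD_insert_self,
      PySem.Dict.insert_insert_self, PySem.Dict.getD_of_not_contains _ _ h]

lemma pv_foldl_ite {α β : Type} (p : β → Prop) [DecidablePred p] (f : α → β → α) (l : List β) (init : α) :
    l.foldl (fun a b => if p b then f a b else a) init = (l.filter (fun b => decide (p b))).foldl f init := by
  induction l generalizing init with
  | nil => rfl
  | cons x t ih =>
    by_cases h : p x <;> simp [h, ih]

lemma pv_nodupG (l : List (List (String × String))) : (pvG l).keys.Nodup := by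
  unfold pvG pvStepM
  exact PySem.Dict.nodup_keys_foldl_modify_key l pvKeyOf [] (fun _ r v => v ++ [r]) PySem.Dict.empty
    (by simp [PySem.Dict.keys_empty])

lemma pv_keysG (l : List (List (String × String))) :
    (pvG l).keys = PySem.Set.ofList (l.map pvKeyOf) := by
  unfold pvG pvStepM
  rw [PySem.Dict.keys_foldl_modify_key l pvKeyOf [] (fun _ r v => v ++ [r]) PySem.Dict.empty,
    PySem.Dict.keys_empty, PySem.Set.update_nil_left]

lemma pv_getDG (l : List (List (String × String))) (c : String) :
    (pvG l).getD c [] = l.filter (fun r => pvKeyOf r == c) := by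
  unfold pvG pvStepM
  have h := PySem.Dict.getD_foldl_modify_append (l.map (fun r => (pvKeyOf r, r))) PySem.Dict.empty c
  rw [List.foldl_map] at h
  simp only [List.filter_map, List.map_map, Function.comp_def] at h
  simpa [PySem.Dict.getD_empty] using h

lemma pv_itemsG (l : List (List (String × String))) :
    (pvG l).items = (PySem.Set.ofList (l.map pvKeyOf)).map (fun c => (c, l.filter (fun r => pvKeyOf r == c))) := by
  rw [PySem.Dict.items_eq_map_keys _ (pv_nodupG l) [], pv_keysG]
  exact List.map_congr_left (fun c _ => by rw [pv_getDG])

lemma pv_filter_comm {α : Type} (p q : α → Bool) (l : List α) :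
    (l.filter p).filter q = (l.filter q).filter p := by
  simp only [List.filter_filter]
  exact List.filter_congr (fun x _ => Bool.and_comm _ _)

lemma pv_ofList_filter (xs : List String) (q : String → Bool) :
    PySem.Set.ofList (xs.filter q) = (PySem.Set.ofList xs).filter q := by
  induction xs with
  | nil => rfl
  | cons x t ih =>
    cases h : q x with
    | true =>
      simp only [List.filter_cons, h, if_true, PySem.Set.ofList_cons, PySem.Set.discard, ih]
      exact congrArg (x :: ·) (pv_filter_comm _ _ _)
    | false =>
      simp only [List.filter_cons, h, Bool.false_eq_true, if_false, PySem.Set.ofList_cons,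
        PySem.Set.discard, ih, List.filter_filter]
      refine (List.filter_congr fun y _ => ?_).symm
      cases e : y == x with
      | true => simp [eq_of_beq e, h]
      | false => simp

lemma pv_count_eq (rs : List (List (String × String))) (c : String) :
    (rs.filter (fun r => pvKeyOf r == c)).length = (rs.map pvKeyOf).count c := by
  rw [List.count, List.countP_map, ← List.countP_eq_length_filter]
  rfl

-- ===== VERDICT (by name: the statement is the Claim_ definition above) =====
theorem extract_candidate_groups_py_spec : Claim_equal_extract_candidate_groups_py := by
  intro rs _ _
  unfold Spec_extract_candidate_groups_py extract_candidate_groups_py extract_candidate_groups_py_alt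
  have hA : (fun (groups : PySem.Dict String (List (List (String × String)))) (r : List (String × String)) =>
      let feature_key := pvKeyOf r
      let groups := if groups.contains feature_key then groups else groups.insert feature_key []
      groups.modify feature_key [] (fun v => v ++ [r])) = pvStepM :=
    funext fun g => funext fun r => pv_stepA g r
  rw [hA]
  dsimp only
  have hcnt : ∀ k, (rs.foldl (fun counts r => counts.modify (pvKeyOf r) 0 fun c => c + 1) (PySem.Dict.empty : PySem.Dict String Int)).getD k 0
      = (((rs.map pvKeyOf).count k : Nat) : Int) := by
    intro k
    rw [show (List.foldl (fun counts r => counts.modify (pvKeyOf r) 0 fun c => c + 1) (PySem.Dict.empty : PySem.Dict String Int) rs)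
        = List.foldl (fun (d : PySem.Dict String Int) (x : String) => d.modify x 0 fun c => c + 1) PySem.Dict.empty (rs.map pvKeyOf) from
        (List.foldl_map (f := pvKeyOf) (g := fun (d : PySem.Dict String Int) (k : String) => d.modify k 0 fun c => c + 1) (l := rs) (init := PySem.Dict.empty)).symm,
      ← PySem.Dict.counter_eq_foldl, PySem.Dict.getD_counter]
  have hstep : (fun (groups : PySem.Dict String (List (List (String × String)))) (r : List (String × String)) =>
      if (rs.foldl (fun counts r => counts.modify (pvKeyOf r) 0 fun c => c + 1) (PySem.Dict.empty : PySem.Dict String Int)).getD (pvKeyOf r) 0 > 1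
      then (groups.setdefault (pvKeyOf r) []).modify (pvKeyOf r) [] fun v => v ++ [r] else groups)
      = (fun groups r => if 1 < (((rs.map pvKeyOf).count (pvKeyOf r) : Nat) : Int) then pvStepM groups r else groups) := by
    funext g r
    simp only [gt_iff_lt, hcnt, pv_stepB]
  rw [hstep, pv_foldl_ite (p := fun r => 1 < (((rs.map pvKeyOf).count (pvKeyOf r) : Nat) : Int)) pvStepM rs PySem.Dict.empty]
  rw [show List.foldl pvStepM PySem.Dict.empty rs = pvG rs from rfl,
    show ∀ l, List.foldl pvStepM PySem.Dict.empty l = pvG l from fun _ => rfl]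
  rw [pv_itemsG, pv_itemsG, List.filter_map]
  rw [show (List.filter (fun r => decide (1 < (((rs.map pvKeyOf).count (pvKeyOf r) : Nat) : Int))) rs).map pvKeyOf
      = (rs.map pvKeyOf).filter (fun k => decide (1 < ((((rs.map pvKeyOf).count k : Nat)) : Int))) from (List.filter_map (f := pvKeyOf) (p := fun k => decide (1 < (((rs.map pvKeyOf).count k : Nat) : Int))) (l := rs)).symm]
  rw [pv_ofList_filter]
  have hpred : ∀ c ∈ PySem.Set.ofList (rs.map pvKeyOf),
      ((fun kv => decide (1 < kv.2.length)) ∘ (fun c => (c, rs.filter (fun r => pvKeyOf r == c)))) c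
      = (fun k => decide (1 < ((((rs.map pvKeyOf).count k : Nat)) : Int))) c := by
    intro c _
    simp only [Function.comp_apply, pv_count_eq]
    exact decide_eq_decide.mpr (Nat.one_lt_cast).symm
  rw [List.filter_congr hpred]
  refine List.map_congr_left (fun c hc => ?_)
  have hqk : decide (1 < ((((rs.map pvKeyOf).count c : Nat)) : Int)) = true := (List.mem_filter.mp hc).2
  refine congrArg (fun l => (c, l)) ?_
  rw [List.filter_filter]
  refine List.filter_congr (fun r _ => ?_)
  cases e : pvKeyOf r == c with
  | true => simp only [Bool.true_and]; rw [eq_of_beq e] at *; exact hqk.symm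
  | false => simp
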